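-- pv_equiv track=rewrite | github.com/yulikafsd/goit-algo-hw-08 | task1.py | join_cables_list
-- ===== SOURCE A (Python) =====
-- def join_cables_list(cable_len):
--
--     if not cable_len:
--         return 0
--
--     total_sum = 0
--     cables = cable_len.copy()
--
--     while len(cables) > 1:
--         first = cables.pop(0)
--         second = cables.pop(0)
--         merged = first + second
--         total_sum += merged
--         cables.insert(0, merged)
--
--     return total_sum
-- ===== SOURCE B (Python) =====
-- def join_cables_list(cable_len):
--     # One pass: total is the sum of all running prefix sums after the first element.
--     if not cable_len:
--         return 0
--     running = cable_len[0]
--     total = 0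
--     for x in cable_len[1:]:
--         running += x
--         total += running
--     return total
-- ===== Notes on version B (the rewrite author's own statement) =====
-- stated objective: faster
-- what changed: Replaced the repeated pop(0)/insert(0) merging loop over a mutated list by a single left-to-right pass accumulating a running prefix sum and its total.
import Mathlib
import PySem

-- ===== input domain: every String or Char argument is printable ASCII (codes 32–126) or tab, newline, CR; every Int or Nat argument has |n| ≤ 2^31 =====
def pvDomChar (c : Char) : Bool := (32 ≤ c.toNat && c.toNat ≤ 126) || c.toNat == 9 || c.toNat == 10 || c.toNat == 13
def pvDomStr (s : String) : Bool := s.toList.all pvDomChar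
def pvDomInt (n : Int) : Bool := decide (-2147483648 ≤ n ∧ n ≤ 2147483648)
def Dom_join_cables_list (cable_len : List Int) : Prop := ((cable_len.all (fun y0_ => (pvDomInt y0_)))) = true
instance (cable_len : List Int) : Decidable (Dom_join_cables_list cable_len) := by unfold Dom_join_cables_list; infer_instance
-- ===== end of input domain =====

-- B replaces A's O(n^2) pop(0)/insert(0) merging loop by a single O(n) pass with a running prefix sum.

-- ===== PORT A =====
-- while len(cables) > 1: first = pop(0); second = pop(0); merged = first+second;
-- total += merged; insert(0, merged)
def joinCablesLoopA (cables : List Int) (total : Int) : Int :=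
  match cables with
  | first :: second :: rest => joinCablesLoopA ((first + second) :: rest) (total + (first + second))
  | _ => total
termination_by cables.length

def join_cables_list (cable_len : List Int) : Int :=
  if cable_len = [] then 0
  else joinCablesLoopA cable_len 0

-- ===== PORT B =====
def joinCablesLoopB (xs : List Int) (running total : Int) : Int :=
  match xs with
  | [] => total
  | x :: rest => joinCablesLoopB rest (running + x) (total + (running + x))

def join_cables_list_alt (cable_len : List Int) : Int :=
  match cable_len with
  | [] => 0
  | x :: rest => joinCablesLoopB rest x 0

-- ===== PRECONDITION & SPEC =====
def Spec_join_cables_list (cable_len : List Int) (out : Int) : Prop := out = join_cables_list_alt cable_len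
instance (cable_len : List Int) (out : Int) : Decidable (Spec_join_cables_list cable_len out) := by unfold Spec_join_cables_list; infer_instance

-- ===== CLAIM (what is proved, stated in full; the proofs are below) =====
def Claim_equal_join_cables_list : Prop := ∀ (cable_len : List Int), Dom_join_cables_list cable_len → Spec_join_cables_list cable_len (join_cables_list cable_len)

-- ===== LEMMAS AND PROOFS =====
theorem loopA_eq_loopB (xs : List Int) (r t : Int) :
    joinCablesLoopA (r :: xs) t = joinCablesLoopB xs r t := by
  induction xs generalizing r t with
  | nil => simp [joinCablesLoopA.eq_def, joinCablesLoopB]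
  | cons x rest ih => rw [joinCablesLoopA, joinCablesLoopB]; exact ih _ _

-- ===== VERDICT (by name: the statement is the Claim_ definition above) =====
theorem join_cables_list_spec : Claim_equal_join_cables_list := by
  intro cable_len _
  unfold Spec_join_cables_list join_cables_list join_cables_list_alt
  cases cable_len with
  | nil => simp
  | cons x rest => simp [loopA_eq_loopB]
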